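-- pv_equiv track=rewrite | github.com/ziweiq-29/halo | get_distribution_plots.py | _pick_input_basename
-- ===== SOURCE A (Python) =====
-- def _pick_input_basename(file_tag, file_tag_to_inputs):
--     candidates = sorted(file_tag_to_inputs.get(file_tag, []))
--     if not candidates:
--         return None
--     if len(candidates) == 1:
--         return candidates[0]
--     # 多个候选时，优先包含 file_tag 的名字
--     for c in candidates:
--         if file_tag in c:
--             return c
--     return candidates[0]
-- ===== SOURCE B (Python) =====
-- def _pick_input_basename(file_tag, file_tag_to_inputs):
--     candidates = file_tag_to_inputs.get(file_tag, [])
--     if not candidates: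
--         return None
--     return min(candidates, key=lambda c: (file_tag not in c, c))
-- ===== Notes on version B (the rewrite author's own statement) =====
-- stated objective: simpler
-- what changed: Replaced A's sort of the candidate list followed by a scan for the first tag-containing name with a single min-selection pass using the composite key (tag not in c, c).
import Mathlib
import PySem

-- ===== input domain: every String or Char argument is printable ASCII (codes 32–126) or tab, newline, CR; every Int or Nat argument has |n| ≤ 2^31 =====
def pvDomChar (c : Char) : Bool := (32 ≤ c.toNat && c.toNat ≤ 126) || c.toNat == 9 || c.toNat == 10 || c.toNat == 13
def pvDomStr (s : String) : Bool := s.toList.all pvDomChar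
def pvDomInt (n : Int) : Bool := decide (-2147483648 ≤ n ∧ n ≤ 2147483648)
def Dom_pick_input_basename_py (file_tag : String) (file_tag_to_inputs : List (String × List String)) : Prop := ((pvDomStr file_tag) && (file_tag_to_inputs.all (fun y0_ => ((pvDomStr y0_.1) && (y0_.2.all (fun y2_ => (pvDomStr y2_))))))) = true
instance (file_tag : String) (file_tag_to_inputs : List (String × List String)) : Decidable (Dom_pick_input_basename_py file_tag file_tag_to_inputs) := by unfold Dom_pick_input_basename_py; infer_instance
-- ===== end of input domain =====

-- B replaces A's sort-then-scan by a single min-selection pass with a composite key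
-- (contains-tag first, lexicographic second); simpler, and the return values are proved equal.

-- ===== PORT A =====
-- the 'for c in candidates: if file_tag in c: return c' loop of A
def pickA_loop (file_tag : String) : List String → Option String
  | [] => none
  | c :: rest => if PySem.Str.isIn file_tag c then some c else pickA_loop file_tag rest

def pick_input_basename_py (file_tag : String) (file_tag_to_inputs : List (String × List String)) : Option String :=
  let candidates := PySem.List.sorted ((PySem.Dict.mk file_tag_to_inputs).getD file_tag []) (fun x => x) false
  if candidates = [] then none
  else if candidates.length = 1 then PySem.List.pyGet? candidates 0
  else match pickA_loop file_tag candidates with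
    | some c => some c
    | none => PySem.List.pyGet? candidates 0

-- ===== PORT B =====
def pick_input_basename_py_alt (file_tag : String) (file_tag_to_inputs : List (String × List String)) : Option String :=
  let candidates := (PySem.Dict.mk file_tag_to_inputs).getD file_tag []
  if candidates = [] then none
  else PySem.List.min2? candidates (fun c => !PySem.Str.isIn file_tag c) (fun c => c)

-- ===== PRECONDITION & SPEC =====
def Spec_pick_input_basename_py (file_tag : String) (file_tag_to_inputs : List (String × List String)) (out : Option String) : Prop := out = pick_input_basename_py_alt file_tag file_tag_to_inputs
instance (file_tag : String) (file_tag_to_inputs : List (String × List String)) (out : Option String) : Decidable (Spec_pick_input_basename_py file_tag file_tag_to_inputs out) := by unfold Spec_pick_input_basename_py; infer_instance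

-- ===== CLAIM (what is proved, stated in full; the proofs are below) =====
def Claim_equal_pick_input_basename_py : Prop := ∀ (file_tag : String) (file_tag_to_inputs : List (String × List String)), Dom_pick_input_basename_py file_tag file_tag_to_inputs → Spec_pick_input_basename_py file_tag file_tag_to_inputs (pick_input_basename_py file_tag file_tag_to_inputs)

-- ===== LEMMAS AND PROOFS =====

-- the composite key order: 'contains the tag' first (False < True on 'not in'), then lexicographic
def keyLE (tag a b : String) : Prop :=
  (PySem.Str.isIn tag a = true ∧ PySem.Str.isIn tag b = false) ∨
  (PySem.Str.isIn tag a = PySem.Str.isIn tag b ∧ a ≤ b)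

def PickMin (tag : String) (xs : List String) (c : String) : Prop :=
  c ∈ xs ∧ ∀ y ∈ xs, keyLE tag c y

theorem isMin_unique {tag : String} {xs : List String} {c c' : String}
    (h : PickMin tag xs c) (h' : PickMin tag xs c') : c = c' := by
  have h1 := h.2 c' h'.1
  have h2 := h'.2 c h.1
  rcases h1 with ⟨ha, hb⟩ | ⟨ha, hb⟩
  · rcases h2 with ⟨hc, hd⟩ | ⟨hc, hd⟩
    · rw [hb] at hc; exact (Bool.false_ne_true hc).elim
    · rw [ha, hb] at hc; exact (Bool.false_ne_true hc).elim
  · rcases h2 with ⟨hc, hd⟩ | ⟨hc, hd⟩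
    · rw [hd, hc] at ha; exact (Bool.false_ne_true ha).elim
    · exact le_antisymm hb hd

theorem pickA_loop_eq_some {tag c : String} : ∀ {ys : List String},
    pickA_loop tag ys = some c →
    c ∈ ys ∧ PySem.Str.isIn tag c = true ∧
      (ys.Pairwise (· ≤ ·) → ∀ y ∈ ys, PySem.Str.isIn tag y = true → c ≤ y)
  | [], h => by simp [pickA_loop] at h
  | a :: t, h => by
    by_cases hp : PySem.Str.isIn tag a = true
    · simp [pickA_loop, PySem.Str.isIn] at h hp
      simp [hp] at h
      subst h
      refine ⟨List.mem_cons_self, hp, ?_⟩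
      intro hpw y hy _
      rcases List.mem_cons.mp hy with rfl | hyt
      · exact le_refl _
      · exact (List.pairwise_cons.mp hpw).1 y hyt
    · simp [pickA_loop, PySem.Str.isIn] at h hp
      simp [hp] at h
      obtain ⟨hc, hin, hmin⟩ := pickA_loop_eq_some h
      refine ⟨List.mem_cons_of_mem _ hc, hin, ?_⟩
      intro hpw y hy hyin
      rcases List.mem_cons.mp hy with rfl | hyt
      · simp [PySem.Str.isIn, hp] at hyin
      · exact hmin (List.pairwise_cons.mp hpw).2 y hyt hyin

theorem pickA_loop_eq_none {tag : String} : ∀ {ys : List String},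
    pickA_loop tag ys = none → ∀ y ∈ ys, PySem.Str.isIn tag y = false
  | [], _ => by simp
  | a :: t, h => by
    by_cases hp : PySem.Str.isIn tag a = true
    · simp [pickA_loop, PySem.Str.isIn] at h hp
      simp [hp] at h
    · simp [pickA_loop, PySem.Str.isIn] at h hp
      simp [hp] at h
      intro y hy
      rcases List.mem_cons.mp hy with rfl | hyt
      · exact hp
      · exact pickA_loop_eq_none h y hyt

-- A's value on the sorted candidate list is a minimum for the composite key
theorem portA_isMin {tag : String} {xs : List String} {c0 : String} {rest : List String}
    (hs : PySem.List.sorted xs (fun x => x) false = c0 :: rest) :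
    ∃ r, (if (c0 :: rest).length = 1 then PySem.List.pyGet? (c0 :: rest) 0
          else match pickA_loop tag (c0 :: rest) with
          | some c => some c
          | none => PySem.List.pyGet? (c0 :: rest) 0) = some r ∧ PickMin tag xs r := by
  have hpw : (c0 :: rest).Pairwise (· ≤ ·) := by
    have := PySem.List.sorted_pairwise (xs := xs) (key := fun x => x) ; rw [hs] at this; exact this
  have hmem : ∀ y, y ∈ c0 :: rest ↔ y ∈ xs := by
    intro y
    have := PySem.List.mem_sorted xs (fun x => x) false y
    rw [hs] at this; exact this
  have hget : PySem.List.pyGet? (c0 :: rest) 0 = some c0 := by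
    simp [PySem.List.pyGet?, PySem.List.pyIdx?]
  by_cases hlen : (c0 :: rest).length = 1
  · have hrest : rest = [] := by
      simpa using hlen
    subst hrest
    rw [if_pos hlen, hget]
    refine ⟨c0, rfl, (hmem c0).mp List.mem_cons_self, ?_⟩
    intro y hy
    have : y = c0 := by simpa using (hmem y).mpr hy
    subst this
    exact Or.inr ⟨rfl, le_refl _⟩
  · rw [if_neg hlen]
    cases hloop : pickA_loop tag (c0 :: rest) with
    | some c =>
      obtain ⟨hc, hin, hmin⟩ := pickA_loop_eq_some hloop
      refine ⟨c, rfl, (hmem c).mp hc, ?_⟩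
      intro y hy
      by_cases hyin : PySem.Str.isIn tag y = true
      · exact Or.inr ⟨by rw [hin, hyin], hmin hpw y ((hmem y).mpr hy) hyin⟩
      · exact Or.inl ⟨hin, Bool.eq_false_iff.mpr hyin⟩
    | none =>
      have hnone := pickA_loop_eq_none hloop
      refine ⟨c0, hget, (hmem c0).mp List.mem_cons_self, ?_⟩
      intro y hy
      refine Or.inr ⟨by rw [hnone c0 List.mem_cons_self, hnone y ((hmem y).mpr hy)], ?_⟩
      exact PySem.List.key_head_sorted_le xs (fun x => x) hs y hy

-- Bool '<' of the negated 'contains' flags, spelled out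
theorem notIn_lt_iff (a b : Bool) : ((!a) < (!b)) ↔ (a = true ∧ b = false) := by
  cases a <;> cases b <;> decide

theorem keyLE_trans {tag a b c : String} (h1 : keyLE tag a b) (h2 : keyLE tag b c) :
    keyLE tag a c := by
  rcases h1 with ⟨a1, a2⟩ | ⟨a1, a2⟩ <;> rcases h2 with ⟨b1, b2⟩ | ⟨b1, b2⟩
  · rw [a2] at b1; exact (Bool.false_ne_true b1).elim
  · exact Or.inl ⟨a1, by rw [← b1]; exact a2⟩
  · exact Or.inl ⟨by rw [a1]; exact b1, b2⟩
  · exact Or.inr ⟨by rw [a1]; exact b1, le_trans a2 b2⟩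

-- B's running-minimum fold returns a minimum for the composite key
theorem min2_fold_isMin (tag : String) : ∀ (t : List String) (m : String),
    ∃ r, List.foldl
      (fun acc x =>
        match acc with
        | none => some x
        | some m =>
          if (decide ((!PySem.Str.isIn tag x) < (!PySem.Str.isIn tag m)) ||
              !decide ((!PySem.Str.isIn tag m) < (!PySem.Str.isIn tag x)) && decide (x < m)) = true
          then some x else some m)
      (some m) t = some r ∧ r ∈ m :: t ∧ ∀ y ∈ m :: t, keyLE tag r y
  | [], m => by
    refine ⟨m, rfl, List.mem_cons_self, ?_⟩
    intro y hy
    rcases List.mem_cons.mp hy with rfl | hyt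
    · exact Or.inr ⟨rfl, le_refl _⟩
    · simp at hyt
  | x :: t, m => by
    by_cases hstep : ((!PySem.Str.isIn tag x) < (!PySem.Str.isIn tag m) ∨
        (¬ (!PySem.Str.isIn tag m) < (!PySem.Str.isIn tag x) ∧ x < m))
    · obtain ⟨r, hr, hrmem, hrmin⟩ := min2_fold_isMin tag t x
      have hxm : keyLE tag x m := by
        rcases hstep with h | ⟨h1, h2⟩
        · exact Or.inl ((notIn_lt_iff _ _).mp h)
        · cases hix : PySem.Str.isIn tag x <;> cases him : PySem.Str.isIn tag m
          · exact Or.inr ⟨by rw [hix, him], le_of_lt h2⟩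
          · exact absurd ((notIn_lt_iff _ _).mpr ⟨him, hix⟩) h1
          · exact Or.inl ⟨hix, him⟩
          · exact Or.inr ⟨by rw [hix, him], le_of_lt h2⟩
      refine ⟨r, ?_, ?_, ?_⟩
      · rw [← hr, List.foldl_cons]
        congr 1
        show (if (decide ((!PySem.Str.isIn tag x) < (!PySem.Str.isIn tag m)) ||
              !decide ((!PySem.Str.isIn tag m) < (!PySem.Str.isIn tag x)) && decide (x < m)) = true
          then some x else some m) = some x
        rw [if_pos]
        rcases hstep with h | ⟨h1, h2⟩
        · simp only [decide_eq_true h, Bool.true_or]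
        · simp only [decide_eq_false h1, decide_eq_true h2, Bool.not_false, Bool.true_and,
            Bool.or_true]
      · rcases List.mem_cons.mp hrmem with rfl | hrt
        · exact List.mem_cons_of_mem _ List.mem_cons_self
        · exact List.mem_cons_of_mem _ (List.mem_cons_of_mem _ hrt)
      · intro y hy
        rcases List.mem_cons.mp hy with rfl | hyt
        · exact keyLE_trans (hrmin x List.mem_cons_self) hxm
        · exact hrmin y hyt
    · obtain ⟨r, hr, hrmem, hrmin⟩ := min2_fold_isMin tag t m
      have h1 : ¬ ((!PySem.Str.isIn tag x) < (!PySem.Str.isIn tag m)) :=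
        fun h => hstep (Or.inl h)
      have h2 : ¬ ((!PySem.Str.isIn tag m) < (!PySem.Str.isIn tag x)) → ¬ (x < m) :=
        fun ha hb => hstep (Or.inr ⟨ha, hb⟩)
      have hmx : keyLE tag m x := by
        cases him : PySem.Str.isIn tag m <;> cases hix : PySem.Str.isIn tag x
        · refine Or.inr ⟨by rw [him, hix], not_lt.mp (h2 ?_)⟩
          rw [him, hix]; decide
        · exact absurd ((notIn_lt_iff _ _).mpr ⟨hix, him⟩) h1
        · exact Or.inl ⟨him, hix⟩
        · refine Or.inr ⟨by rw [him, hix], not_lt.mp (h2 ?_)⟩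
          rw [him, hix]; decide
      refine ⟨r, ?_, ?_, ?_⟩
      · rw [← hr, List.foldl_cons]
        congr 1
        show (if (decide ((!PySem.Str.isIn tag x) < (!PySem.Str.isIn tag m)) ||
              !decide ((!PySem.Str.isIn tag m) < (!PySem.Str.isIn tag x)) && decide (x < m)) = true
          then some x else some m) = some m
        rw [if_neg]
        intro hc
        apply hstep
        rcases Bool.or_eq_true_iff.mp hc with h | h
        · exact Or.inl (of_decide_eq_true h)
        · rcases Bool.and_eq_true_iff.mp h with ⟨ha, hb⟩
          exact Or.inr ⟨by simpa using ha, of_decide_eq_true hb⟩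
      · rcases List.mem_cons.mp hrmem with rfl | hrt
        · exact List.mem_cons_self
        · exact List.mem_cons_of_mem _ (List.mem_cons_of_mem _ hrt)
      · intro y hy
        rcases List.mem_cons.mp hy with rfl | hyt
        · exact hrmin y List.mem_cons_self
        · rcases List.mem_cons.mp hyt with rfl | hyt2
          · exact keyLE_trans (hrmin m List.mem_cons_self) hmx
          · exact hrmin y (List.mem_cons_of_mem _ hyt2)

theorem min2_isMin {tag : String} {xs : List String} (hne : xs ≠ []) :
    ∃ r, PySem.List.min2? xs (fun c => !PySem.Str.isIn tag c) (fun c => c) = some r ∧ PickMin tag xs r := by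
  match xs, hne with
  | x :: t, _ =>
    obtain ⟨r, hr, hrmem, hrmin⟩ := min2_fold_isMin tag t x
    refine ⟨r, ?_, hrmem, hrmin⟩
    have hunf : PySem.List.min2? (x :: t) (fun c => !PySem.Str.isIn tag c) (fun c => c)
        = List.foldl
          (fun acc y =>
            match acc with
            | none => some y
            | some m =>
              if (decide ((!PySem.Str.isIn tag y) < (!PySem.Str.isIn tag m)) ||
                  !decide ((!PySem.Str.isIn tag m) < (!PySem.Str.isIn tag y)) && decide (y < m)) = true
              then some y else some m)
          (some x) t := by
      unfold PySem.List.min2?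
      rw [List.foldl_cons]
      congr 1
      · funext acc y
        cases acc <;> rfl
    rw [hunf]; exact hr

-- core equality, for any candidate list
theorem core_eq (tag : String) (xs : List String) :
    (let candidates := PySem.List.sorted xs (fun x => x) false
     if candidates = [] then none
     else if candidates.length = 1 then PySem.List.pyGet? candidates 0
     else match pickA_loop tag candidates with
       | some c => some c
       | none => PySem.List.pyGet? candidates 0)
    = (if xs = [] then none
       else PySem.List.min2? xs (fun c => !PySem.Str.isIn tag c) (fun c => c)) := by
  by_cases hxs : xs = []
  · subst hxs; simp [PySem.List.sorted]
  · have hsne : PySem.List.sorted xs (fun x => x) false ≠ [] := by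
      intro h; exact hxs ((PySem.List.sorted_eq_nil_iff xs (fun x => x) false).mp h)
    cases hs : PySem.List.sorted xs (fun x => x) false with
    | nil => exact absurd hs hsne
    | cons c0 rest =>
      obtain ⟨rA, hrA, hminA⟩ := portA_isMin (tag := tag) hs
      obtain ⟨rB, hrB, hminB⟩ := min2_isMin (tag := tag) (xs := xs) hxs
      have hreq : rA = rB := isMin_unique hminA hminB
      simp only [if_neg hxs]
      rw [if_neg (by simp : (c0 :: rest) ≠ [])]
      rw [hrA, hreq, hrB]

-- ===== VERDICT (by name: the statement is the Claim_ definition above) =====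
theorem pick_input_basename_py_spec : Claim_equal_pick_input_basename_py := by
  intro file_tag file_tag_to_inputs _
  unfold Spec_pick_input_basename_py pick_input_basename_py pick_input_basename_py_alt
  exact core_eq file_tag ((PySem.Dict.mk file_tag_to_inputs).getD file_tag [])
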